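-- pv_equiv track=rewrite | github.com/FiveNine/AdventOfCode2023 | day-3/part2.py | GetLeftDigits
-- ===== SOURCE A (Python) =====
-- def GetLeftDigits(row, numberIndex):
--     digits = ''
--     endIndex = numberIndex[1]
--     if endIndex > 0:
--         for char in row[:endIndex]:
--             if char.isdigit():
--                 digits += char
--             else:
--                 digits = ''
--     return digits
-- ===== SOURCE B (Python) =====
-- def GetLeftDigits(row, numberIndex):
--     e = min(numberIndex[1], len(row))
--     if e <= 0:
--         return ''
--     buf = []
--     i = e - 1
--     while i >= 0 and row[i].isdigit():
--         buf.append(row[i])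
--         i -= 1
--     return ''.join(reversed(buf))
-- ===== Notes on version B (the rewrite author's own statement) =====
-- stated objective: faster
-- what changed: Instead of scanning the whole prefix row[:endIndex] left-to-right while resetting the accumulator at every non-digit, B walks backward from the clamped end index collecting digits and stops at the first non-digit, then reverses the collected characters.
import Mathlib
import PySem

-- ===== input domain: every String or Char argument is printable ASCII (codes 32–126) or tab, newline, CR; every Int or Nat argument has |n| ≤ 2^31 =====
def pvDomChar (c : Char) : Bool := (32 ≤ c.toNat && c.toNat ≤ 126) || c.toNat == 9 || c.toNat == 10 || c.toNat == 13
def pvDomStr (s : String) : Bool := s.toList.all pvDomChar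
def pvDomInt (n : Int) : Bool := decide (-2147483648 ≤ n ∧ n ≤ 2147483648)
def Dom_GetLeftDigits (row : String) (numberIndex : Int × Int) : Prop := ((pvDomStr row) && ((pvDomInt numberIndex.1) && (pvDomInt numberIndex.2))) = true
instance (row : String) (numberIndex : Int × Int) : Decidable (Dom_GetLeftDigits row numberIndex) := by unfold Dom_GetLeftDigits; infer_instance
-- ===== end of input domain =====

-- B replaces A's full left-to-right prefix scan (resetting on every non-digit) by a backward walk
-- from the clamped end index that stops at the first non-digit, touching only the trailing digit run.

-- ===== PORT A =====
-- digits accumulator over the characters of row[:endIndex], reset to '' on a non-digit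
def GetLeftDigits (row : String) (numberIndex : Int × Int) : String :=
  let endIndex := numberIndex.2
  if endIndex > 0 then
    String.ofList ((PySem.List.slice row.toList none (some endIndex)).foldl
      (fun digits c => if PySem.Chars.isdigit c then digits ++ [c] else []) [])
  else ""

-- ===== PORT B =====
-- the backward while loop: i runs e-1, e-2, …; `i+1` here is Python's i+1, buf is built so that
-- consing replaces Python's append-then-reverse
def altLoop (cs : List Char) : Nat → List Char → List Char
  | 0, buf => buf
  | i + 1, buf =>
    match cs[i]? with
    | some c => if PySem.Chars.isdigit c then altLoop cs i (c :: buf) else buf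
    | none => buf

def GetLeftDigits_alt (row : String) (numberIndex : Int × Int) : String :=
  let cs := row.toList
  let e := min numberIndex.2 (cs.length : Int)
  if e ≤ 0 then "" else String.ofList (altLoop cs e.toNat [])

-- ===== PRECONDITION & SPEC =====
def Spec_GetLeftDigits (row : String) (numberIndex : Int × Int) (out : String) : Prop := out = GetLeftDigits_alt row numberIndex
instance (row : String) (numberIndex : Int × Int) (out : String) : Decidable (Spec_GetLeftDigits row numberIndex out) := by unfold Spec_GetLeftDigits; infer_instance

-- ===== CLAIM (what is proved, stated in full; the proofs are below) =====
def Claim_equal_GetLeftDigits : Prop := ∀ (row : String) (numberIndex : Int × Int), Dom_GetLeftDigits row numberIndex → Spec_GetLeftDigits row numberIndex (GetLeftDigits row numberIndex)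

-- ===== LEMMAS AND PROOFS =====

-- the trailing digit run of a list
def trail (l : List Char) : List Char := (l.reverse.takeWhile PySem.Chars.isdigit).reverse

theorem trail_all (l : List Char) (h : ∀ c ∈ l, PySem.Chars.isdigit c = true) : trail l = l := by
  unfold trail
  rw [List.takeWhile_eq_self_iff.mpr (by intro c hc; exact h c (List.mem_reverse.mp hc)), List.reverse_reverse]

theorem trail_snoc_digit (l : List Char) (c : Char) (h : PySem.Chars.isdigit c = true) :
    trail (l ++ [c]) = trail l ++ [c] := by
  unfold trail
  simp [h]

theorem trail_snoc_nondigit (l : List Char) (c : Char) (h : PySem.Chars.isdigit c = false) :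
    trail (l ++ [c]) = [] := by
  unfold trail
  simp [h]

theorem trail_cons (c : Char) (l : List Char) :
    trail (c :: l) = if l.all PySem.Chars.isdigit then (if PySem.Chars.isdigit c then c :: l else l) else trail l := by
  unfold trail
  rw [List.reverse_cons, List.takeWhile_append]
  by_cases hl : l.all PySem.Chars.isdigit = true
  · have he : List.takeWhile PySem.Chars.isdigit l.reverse = l.reverse :=
      List.takeWhile_eq_self_iff.mpr (fun x hx => (List.all_eq_true.mp hl) x (List.mem_reverse.mp hx))
    rw [if_pos (by rw [he]), if_pos hl]
    by_cases hc : PySem.Chars.isdigit c = true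
    · simp [hc]
    · simp [hc]
  · have hne : ¬ (List.takeWhile PySem.Chars.isdigit l.reverse).length = l.reverse.length := by
      intro hlen
      apply hl
      have he : List.takeWhile PySem.Chars.isdigit l.reverse = l.reverse :=
        (List.takeWhile_prefix _).eq_of_length hlen
      rw [List.all_eq_true]
      intro x hx
      exact List.takeWhile_eq_self_iff.mp he x (List.mem_reverse.mpr hx)
    rw [if_neg hne, if_neg hl]

theorem foldA_eq_trail (l : List Char) (d : List Char) :
    l.foldl (fun digits c => if PySem.Chars.isdigit c then digits ++ [c] else []) d
      = if l.all PySem.Chars.isdigit then d ++ l else trail l := by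
  induction l generalizing d with
  | nil => simp
  | cons c l ih =>
    simp only [List.foldl_cons, List.all_cons]
    rw [trail_cons]
    by_cases hc : PySem.Chars.isdigit c = true
    · rw [if_pos hc, ih]
      by_cases hl : l.all PySem.Chars.isdigit = true
      · simp [hc, hl]
      · simp [hc, hl]
    · rw [if_neg hc, ih]
      simp only [Bool.not_eq_true] at hc
      by_cases hl : l.all PySem.Chars.isdigit = true
      · simp [hc, hl]
      · simp [hc, hl]

theorem altLoop_eq_trail (cs : List Char) (i : Nat) (buf : List Char) (h : i ≤ cs.length) :
    altLoop cs i buf = trail (cs.take i) ++ buf := by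
  induction i generalizing buf with
  | zero => simp [altLoop, trail]
  | succ i ih =>
    have hi : i < cs.length := h
    have hget : cs[i]? = some cs[i] := List.getElem?_eq_getElem hi
    have htake : cs.take (i + 1) = cs.take i ++ [cs[i]] := by
      rw [List.take_add_one, hget]
      rfl
    simp only [altLoop, hget]
    by_cases hc : PySem.Chars.isdigit cs[i] = true
    · rw [if_pos hc, ih _ (Nat.le_of_lt hi), htake, trail_snoc_digit _ _ hc]
      simp
    · rw [if_neg hc, htake, trail_snoc_nondigit _ _ (Bool.not_eq_true _ ▸ hc)]
      simp

-- helper: List.take clamps, so taking min with the length changes nothing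
theorem take_min_length {α : Type} (l : List α) (a : Nat) : l.take (min a l.length) = l.take a := by
  by_cases h : a ≤ l.length
  · rw [Nat.min_eq_left h]
  · rw [Nat.min_eq_right (Nat.le_of_not_le h), List.take_length,
      List.take_of_length_le (Nat.le_of_not_le h)]

-- ===== VERDICT (by name: the statement is the Claim_ definition above) =====
theorem GetLeftDigits_spec : Claim_equal_GetLeftDigits := by
  intro row numberIndex _
  unfold Spec_GetLeftDigits GetLeftDigits GetLeftDigits_alt
  set cs := row.toList with hcs
  set n := numberIndex.2 with hn
  by_cases hpos : n > 0
  · rw [if_pos hpos]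
    have hn0 : (0 : Int) ≤ n := le_of_lt hpos
    rw [PySem.List.slice_to cs hn0]
    rw [foldA_eq_trail]
    by_cases he : min n (cs.length : Int) ≤ 0
    · -- then cs = [] (since n > 0)
      have hlen : cs.length = 0 := by
        rcases Nat.eq_zero_or_pos cs.length with h0 | h0
        · exact h0
        · exfalso; have : (0 : Int) < min n cs.length := lt_min hpos (by exact_mod_cast h0)
          omega
      have hnil : cs = [] := List.length_eq_zero_iff.mp hlen
      rw [if_pos he]
      simp [hnil]
    · rw [if_neg he]
      have hEtoNat : (min n (cs.length : Int)).toNat = min n.toNat cs.length := by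
        omega
      have hle : (min n (cs.length : Int)).toNat ≤ cs.length := by omega
      rw [altLoop_eq_trail cs _ [] hle, hEtoNat, take_min_length, List.append_nil]
      by_cases hall : (cs.take n.toNat).all PySem.Chars.isdigit = true
      · rw [if_pos hall]
        simp [trail_all _ (List.all_eq_true.mp hall)]
      · rw [if_neg hall]
  · rw [if_neg hpos]
    have : min n (cs.length : Int) ≤ 0 := le_trans (min_le_left _ _) (by omega)
    rw [if_pos this]
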